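-- pv_equiv track=rewrite | github.com/democra-ai/HuggingClaw | scripts/conversation-loop.py | _extract_traceback
-- ===== SOURCE A (Python) =====
-- def _extract_traceback(stderr: str) -> str:
--     """Extract Python traceback from STDERR."""
--     if not stderr:
--         return ""
--     lines = stderr.split('\n')
--     traceback_lines = []
--     in_traceback = False
--     for line in lines:
--         if 'Traceback (most recent call last)' in line:
--             in_traceback = True
--         if in_traceback:
--             traceback_lines.append(line)
--             if line.strip().startswith(('Error:', 'Exception:', 'File')) and ':' in line:
--                 # End of traceback
--                 break
--     return '\n'.join(traceback_lines[-20:]) if traceback_lines else ""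
-- ===== SOURCE B (Python) =====
-- def _extract_traceback(stderr: str) -> str:
--     """Extract Python traceback from STDERR.
--
--     Locates the marker by raw substring search on the whole text, converts
--     the character offset to a line number by counting newlines before it,
--     and emits a window of at most 20 lines computed by index arithmetic
--     (no flag, no accumulator list)."""
--     pos = stderr.find('Traceback (most recent call last)')
--     if pos == -1:
--         return ""
--     tail = stderr.split('\n')[stderr[:pos].count('\n'):]
--     end = next((i for i, line in enumerate(tail)
--                 if line.strip().startswith(('Error:', 'Exception:', 'File')) and ':' in line),
--                len(tail) - 1)
--     return '\n'.join(tail[max(0, end - 19):end + 1])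
-- ===== Notes on version B (the rewrite author's own statement) =====
-- stated objective: alternative
-- what changed: B locates the marker by a raw substring search on the whole text (str.find) and converts the character offset to a line number by counting newlines before it, then emits the 20-line window by index arithmetic (max(0,end-19):end+1) from the terminator index, instead of A's per-line flag-guarded scan that accumulates lines and slices the last 20.
import Mathlib
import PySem

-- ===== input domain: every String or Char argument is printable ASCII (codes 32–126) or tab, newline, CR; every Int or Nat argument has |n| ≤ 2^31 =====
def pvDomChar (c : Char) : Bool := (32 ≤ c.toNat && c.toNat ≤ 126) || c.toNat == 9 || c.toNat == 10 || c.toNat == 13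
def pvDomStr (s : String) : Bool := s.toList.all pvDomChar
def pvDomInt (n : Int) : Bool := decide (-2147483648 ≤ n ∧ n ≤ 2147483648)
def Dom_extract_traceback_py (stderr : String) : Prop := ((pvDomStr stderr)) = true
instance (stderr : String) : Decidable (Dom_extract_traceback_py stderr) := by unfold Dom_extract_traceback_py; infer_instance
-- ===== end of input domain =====

-- B locates the marker by substring search on the raw text (str.find), maps the char offset to a
-- line number by counting newlines, and emits the 20-line window by index arithmetic — an
-- alternative decomposition of the same O(n) task (no flag, no accumulator list).


-- shared by both ports: the terminator test both Pythons perform on a line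
def pvTerm (l : String) : Bool :=
  (PySem.Str.startswith (PySem.Str.strip l) "Error:" ||
   PySem.Str.startswith (PySem.Str.strip l) "Exception:" ||
   PySem.Str.startswith (PySem.Str.strip l) "File") && PySem.Str.isIn ":" l

-- ===== PORT A =====
-- A's per-line anchor test
def pvAnchorIn (l : String) : Bool := PySem.Str.isIn "Traceback (most recent call last)" l

-- A's for-loop with the in_traceback flag, the append and the break, as structural recursion
def pvLoopA : List String → List String → Bool → List String
  | [], acc, _ => acc
  | l :: rest, acc, inTb =>
    let inTb' := if pvAnchorIn l then true else inTb
    if inTb' then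
      let acc' := acc ++ [l]
      if pvTerm l then acc' else pvLoopA rest acc' true
    else pvLoopA rest acc inTb'

def extract_traceback_py (stderr : String) : String :=
  if stderr = "" then ""
  else
    let lines := (PySem.Str.split? stderr "\n").getD []   -- sep "\n" ≠ "": split? is always `some` here
    let tb := pvLoopA lines [] false
    if tb ≠ [] then PySem.Str.join "\n" (PySem.List.slice tb (some (-20)) none) else ""

-- ===== PORT B =====
def extract_traceback_py_alt (stderr : String) : String :=
  let pos := PySem.Str.find stderr "Traceback (most recent call last)"
  if pos = -1 then ""
  else
    -- stderr[:pos].count('\n') , then lines[...:]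
    let lines := (PySem.Str.split? stderr "\n").getD []   -- sep "\n" ≠ "": split? is always `some` here
    let tail := lines.drop (PySem.Str.count (PySem.Str.slice stderr none (some pos)) "\n")
    -- end = next((i for i, line in enumerate(tail) if <terminator>), len(tail) - 1)
    let e : Int := match (PySem.List.enumerate tail).find? (fun p => pvTerm p.2) with
                   | some p => p.1
                   | none => (tail.length : Int) - 1
    PySem.Str.join "\n" (PySem.List.slice tail (some (max 0 (e - 19))) (some (e + 1)))

-- ===== PRECONDITION & SPEC =====
def Spec_extract_traceback_py (stderr : String) (out : String) : Prop := out = extract_traceback_py_alt stderr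
instance (stderr : String) (out : String) : Decidable (Spec_extract_traceback_py stderr out) := by unfold Spec_extract_traceback_py; infer_instance

-- ===== CLAIM (what is proved, stated in full; the proofs are below) =====
def Claim_equal_extract_traceback_py : Prop := ∀ (stderr : String), Dom_extract_traceback_py stderr → Spec_extract_traceback_py stderr (extract_traceback_py stderr)


-- ===== LEMMAS AND PROOFS =====



theorem go_no_newline (l : List Char) (h : '\n' ∉ l) : ∀ (fuel : Nat) (cur : List Char) (acc : List (List Char)),
    PySem.Chars.splitOn.go ['\n'] fuel l cur acc = ((cur.reverse ++ l) :: acc).reverse := by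
  induction l with
  | nil => intro fuel cur acc; rw [PySem.Chars.splitOn.go.eq_def]; cases fuel <;> simp
  | cons c rest ih =>
    intro fuel cur acc
    simp only [List.mem_cons, not_or] at h
    cases fuel with
    | zero => rw [PySem.Chars.splitOn.go.eq_def]
    | succ f =>
      rw [PySem.Chars.splitOn.go.eq_def]
      have hp : List.isPrefixOf ['\n'] (c :: rest) = false := by
        simp [List.isPrefixOf]; intro hh; exact absurd hh h.1
      simp only [hp, Bool.false_eq_true, ite_false]
      rw [ih h.2 f (c :: cur) acc]
      simp

theorem go_acc (l : List Char) : ∀ (fuel : Nat) (cur : List Char) (acc : List (List Char)),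
    PySem.Chars.splitOn.go ['\n'] fuel l cur acc = acc.reverse ++ PySem.Chars.splitOn.go ['\n'] fuel l cur [] := by
  induction l with
  | nil => intro fuel cur acc; rw [PySem.Chars.splitOn.go.eq_def, PySem.Chars.splitOn.go.eq_def]; cases fuel <;> simp
  | cons c rest ih =>
    intro fuel cur acc
    cases fuel with
    | zero => rw [PySem.Chars.splitOn.go.eq_def, PySem.Chars.splitOn.go.eq_def]; simp
    | succ f =>
      rw [PySem.Chars.splitOn.go.eq_def]
      conv_rhs => rw [PySem.Chars.splitOn.go.eq_def]
      by_cases hp : List.isPrefixOf ['\n'] (c :: rest) = true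
      · simp only [hp, ite_true]
        simp only [List.length_singleton, List.drop_succ_cons, List.drop_zero]
        rw [ih f [] (cur.reverse :: acc), ih f [] [cur.reverse]]
        simp
      · simp only [hp, Bool.false_eq_true, ite_false]
        exact ih f (c :: cur) acc

theorem splitOn_no_newline (cs : List Char) (h : '\n' ∉ cs) :
    PySem.Chars.splitOn cs ['\n'] = [cs] := by
  unfold PySem.Chars.splitOn
  rw [go_no_newline cs h]
  simp

theorem splitOn_cons_newline (l rest : List Char) (h : '\n' ∉ l) :
    PySem.Chars.splitOn (l ++ '\n' :: rest) ['\n'] = l :: PySem.Chars.splitOn rest ['\n'] := by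
  unfold PySem.Chars.splitOn
  have key : ∀ (l' : List Char) (fuel : Nat) (cur : List Char) (acc : List (List Char)), '\n' ∉ l' →
      l'.length + rest.length + 1 ≤ fuel →
      PySem.Chars.splitOn.go ['\n'] fuel (l' ++ '\n' :: rest) cur acc =
      PySem.Chars.splitOn.go ['\n'] (fuel - (l'.length + 1)) rest [] ((cur.reverse ++ l') :: acc) := by
    intro l'
    induction l' with
    | nil =>
      intro fuel cur acc _ hf
      cases fuel with
      | zero => omega
      | succ f =>
        rw [PySem.Chars.splitOn.go.eq_def]
        simp [List.isPrefixOf]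
    | cons c lt ih =>
      intro fuel cur acc hnl hf
      simp only [List.mem_cons, not_or] at hnl
      cases fuel with
      | zero => simp at hf
      | succ f =>
        rw [PySem.Chars.splitOn.go.eq_def]
        have hp : List.isPrefixOf ['\n'] (c :: (lt ++ '\n' :: rest)) = false := by
          simp [List.isPrefixOf]; intro hh; exact absurd hh hnl.1
        simp only [List.cons_append, hp, Bool.false_eq_true, ite_false]
        rw [ih f (c :: cur) acc hnl.2 (by simp only [List.length_cons] at hf; omega)]
        simp only [List.reverse_cons, List.length_cons]
        have heq : f - (lt.length + 1) = f + 1 - (lt.length + 1 + 1) := by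
          simp only [List.length_cons] at hf; omega
        rw [← heq]
        congr 2
        simp
  rw [key l ((l ++ '\n' :: rest).length + 1) [] [] h (by simp)]
  rw [go_acc]
  have hlen : (l ++ '\n' :: rest).length + 1 - (l.length + 1) = rest.length + 1 := by simp
  rw [hlen]
  simp

theorem pvDropAppend (l x : List Char) (j : Nat) (h : l.length ≤ j) :
    (l ++ x).drop j = x.drop (j - l.length) := by
  rw [List.drop_append, List.drop_eq_nil_of_le (by omega), List.nil_append]

-- occurrences of a newline-free pattern don't straddle the newline
theorem pvNoStraddle (M l rest : List Char) (j : Nat) (hM2 : '\n' ∉ M)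
    (h : M <+: (l ++ '\n' :: rest).drop j) :
    (j + M.length ≤ l.length ∧ M <+: l.drop j) ∨
    (l.length + 1 ≤ j ∧ M <+: rest.drop (j - l.length - 1)) := by
  by_cases hj : j ≤ l.length
  · left
    rw [List.drop_append_of_le_length hj] at h
    by_cases hlen : j + M.length ≤ l.length
    · refine ⟨hlen, ?_⟩
      rw [List.prefix_iff_eq_take] at h ⊢
      rw [List.take_append_of_le_length (by simp; omega)] at h
      exact h.trans (by rw [← h])
    · exfalso
      have hidx : l.length - j < M.length := by omega
      have hge := h.getElem (i := l.length - j) hidx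
      rw [List.getElem_append_right (by simp)] at hge
      simp at hge
      exact hM2 (hge ▸ List.getElem_mem hidx)
  · right
    refine ⟨by omega, ?_⟩
    rw [pvDropAppend _ _ _ (by omega)] at h
    rw [show j - l.length = (j - l.length - 1) + 1 by omega] at h
    simpa using h

-- lift an occurrence in l to cs, and in rest to cs
theorem pvLiftL (M l rest : List Char) (j : Nat) (hj : j ≤ l.length)
    (h : M <+: l.drop j) : M <+: (l ++ '\n' :: rest).drop j := by
  rw [List.drop_append_of_le_length hj]
  exact h.trans (List.prefix_append _ _)

theorem pvLiftR (M l rest : List Char) (q : Nat)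
    (h : M <+: rest.drop q) : M <+: (l ++ '\n' :: rest).drop (l.length + 1 + q) := by
  rw [pvDropAppend _ _ _ (by omega)]
  rw [show l.length + 1 + q - l.length = q + 1 by omega]
  simpa using h

theorem pvSplitFirst (cs : List Char) : '\n' ∉ cs ∨ ∃ l rest, cs = l ++ '\n' :: rest ∧ '\n' ∉ l := by
  induction cs with
  | nil => left; simp
  | cons c t ih =>
    by_cases hc : c = '\n'
    · right; exact ⟨[], t, by simp [hc], by simp⟩
    · rcases ih with h | ⟨l, rest, rfl, hl⟩
      · left; simp only [List.mem_cons, not_or]; exact ⟨fun hh => hc hh.symm, h⟩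
      · right; exact ⟨c :: l, rest, by simp, by simp only [List.mem_cons, not_or]; exact ⟨fun hh => hc hh.symm, hl⟩⟩

theorem pvIsInL (M l : List Char) (hM1 : M ≠ []) (h : PySem.Chars.isIn M l = true) :
    ∃ j, j + M.length ≤ l.length ∧ M <+: l.drop j := by
  obtain ⟨j, hj⟩ := (PySem.Chars.exists_prefix_drop_iff_isIn M l).mpr h
  have hlen := hj.length_le
  rw [List.length_drop] at hlen
  have hMpos : 0 < M.length := List.length_pos_iff.mpr hM1
  by_cases hjl : j ≤ l.length
  · exact ⟨j, by omega, hj⟩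
  · exfalso
    rw [List.drop_eq_nil_of_le (by omega)] at hj
    exact hM1 (List.prefix_nil.mp hj)

theorem pvBridge_gen (M : List Char) (hM1 : M ≠ []) (hM2 : '\n' ∉ M) :
    ∀ (n : Nat) (cs : List Char), cs.length ≤ n →
    (PySem.Chars.splitOn cs ['\n']).findIdx? (fun ln => PySem.Chars.isIn M ln) =
      (if PySem.Chars.find cs M = -1 then none
       else some ((cs.take (PySem.Chars.find cs M).toNat).count '\n')) := by
  intro n
  induction n using Nat.strong_induction_on with
  | _ n ih =>
    intro cs hcs
    rcases pvSplitFirst cs with hnone | ⟨l, rest, rfl, hl⟩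
    · -- no newline at all: one line
      rw [splitOn_no_newline cs hnone]
      by_cases hIn : PySem.Chars.isIn M cs = true
      · have h0 : 0 ≤ PySem.Chars.find cs M :=
          (PySem.Chars.find_nonneg_iff cs M).mpr ((PySem.Chars.isIn_iff_infix M cs).mp hIn)
        rw [List.findIdx?_cons, hIn, if_pos rfl, if_neg (by omega)]
        have : ((cs.take (PySem.Chars.find cs M).toNat).count '\n') = 0 := by
          rw [List.count_eq_zero]
          intro hmem
          exact hnone (List.mem_of_mem_take hmem)
        rw [this]
      · have hIn' : PySem.Chars.isIn M cs = false := by simpa using hIn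
        have : PySem.Chars.find cs M = -1 :=
          (PySem.Chars.find_eq_neg_one_iff cs M).mpr ((PySem.Chars.isIn_eq_false_iff M cs).mp hIn')
        rw [List.findIdx?_cons, hIn', if_neg (by simp), this]
        simp
    · -- cs = l ++ '\n' :: rest
      rw [splitOn_cons_newline l rest hl]
      have hrlen : rest.length < n := by
        simp only [List.length_append, List.length_cons] at hcs; omega
      by_cases hInL : PySem.Chars.isIn M l = true
      · -- anchor in the first line
        obtain ⟨j, hjb, hj⟩ := pvIsInL M l hM1 hInL
        have hocc : M <+: (l ++ '\n' :: rest).drop j := pvLiftL M l rest j (by omega) hj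
        have hIn : PySem.Chars.isIn M (l ++ '\n' :: rest) = true :=
          (PySem.Chars.exists_prefix_drop_iff_isIn M _).mp ⟨j, hocc⟩
        have h0 : 0 ≤ PySem.Chars.find (l ++ '\n' :: rest) M :=
          (PySem.Chars.find_nonneg_iff _ M).mpr ((PySem.Chars.isIn_iff_infix M _).mp hIn)
        obtain ⟨hpre, hmin⟩ := PySem.Chars.find_spec h0
        set F := (PySem.Chars.find (l ++ '\n' :: rest) M).toNat with hF
        have hFj : F ≤ j := by
          by_contra hgt
          exact hmin j (by omega) hocc
        rw [List.findIdx?_cons, hInL, if_pos rfl, if_neg (by omega)]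
        have htake : (l ++ '\n' :: rest).take F = l.take F :=
          List.take_append_of_le_length (by omega)
        have hcnt : (((l ++ '\n' :: rest).take F).count '\n') = 0 := by
          rw [htake, List.count_eq_zero]
          intro hmem
          exact hl (List.mem_of_mem_take hmem)
        rw [hcnt]
      · -- anchor not in the first line
        have hInL' : PySem.Chars.isIn M l = false := by simpa using hInL
        have hnotL : ∀ j, ¬ M <+: l.drop j := by
          intro j hj
          have := (PySem.Chars.exists_prefix_drop_iff_isIn M l).mp ⟨j, hj⟩
          rw [hInL'] at this
          exact Bool.false_ne_true this
        by_cases hr : PySem.Chars.find rest M = -1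
        · have hFcs : PySem.Chars.find (l ++ '\n' :: rest) M = -1 := by
            by_contra hne
            have h0 : 0 ≤ PySem.Chars.find (l ++ '\n' :: rest) M := by
              have := PySem.Chars.neg_one_le_find (l ++ '\n' :: rest) M; omega
            obtain ⟨hpre, _⟩ := PySem.Chars.find_spec h0
            rcases pvNoStraddle M l rest _ hM2 hpre with ⟨_, hinl⟩ | ⟨_, hinr⟩
            · exact hnotL _ hinl
            · have : PySem.Chars.isIn M rest = true :=
                (PySem.Chars.exists_prefix_drop_iff_isIn M rest).mp ⟨_, hinr⟩
              have : 0 ≤ PySem.Chars.find rest M :=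
                (PySem.Chars.find_nonneg_iff rest M).mpr ((PySem.Chars.isIn_iff_infix M rest).mp this)
              omega
          rw [List.findIdx?_cons, hInL', if_neg (by simp), hFcs, if_pos rfl,
              ih _ hrlen rest (by omega), hr, if_pos rfl]
          simp
        · -- anchor occurs in rest
          have h0r : 0 ≤ PySem.Chars.find rest M := by
            have := PySem.Chars.neg_one_le_find rest M; omega
          obtain ⟨hpreR, hminR⟩ := PySem.Chars.find_spec h0r
          set q := (PySem.Chars.find rest M).toNat with hq
          have hocc : M <+: (l ++ '\n' :: rest).drop (l.length + 1 + q) := pvLiftR M l rest q hpreR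
          have hIn : PySem.Chars.isIn M (l ++ '\n' :: rest) = true :=
            (PySem.Chars.exists_prefix_drop_iff_isIn M _).mp ⟨_, hocc⟩
          have h0 : 0 ≤ PySem.Chars.find (l ++ '\n' :: rest) M :=
            (PySem.Chars.find_nonneg_iff _ M).mpr ((PySem.Chars.isIn_iff_infix M _).mp hIn)
          obtain ⟨hpre, hmin⟩ := PySem.Chars.find_spec h0
          set F := (PySem.Chars.find (l ++ '\n' :: rest) M).toNat with hF
          have hFle : F ≤ l.length + 1 + q := by
            by_contra hgt
            exact hmin _ (by omega) hocc
          have hFge : l.length + 1 ≤ F := by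
            by_contra hlt
            rcases pvNoStraddle M l rest F hM2 hpre with ⟨_, hinl⟩ | ⟨hge, _⟩
            · exact hnotL _ hinl
            · omega
          have hFq : F = l.length + 1 + q := by
            rcases pvNoStraddle M l rest F hM2 hpre with ⟨hb, _⟩ | ⟨_, hinr⟩
            · have hMpos : 0 < M.length := List.length_pos_iff.mpr hM1
              omega
            · have : q ≤ F - l.length - 1 := by
                by_contra hqgt
                exact hminR _ (by omega) hinr
              omega
          rw [List.findIdx?_cons, hInL', if_neg (by simp),
              ih _ hrlen rest (by omega), if_neg hr, if_neg (by omega)]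
          have htake : (l ++ '\n' :: rest).take F = l ++ '\n' :: rest.take q := by
            rw [List.take_append, List.take_of_length_le (by omega), hFq]
            congr 1
            rw [show l.length + 1 + q - l.length = q + 1 by omega]
            rfl
          rw [htake]
          simp only [List.count_append, List.count_cons]
          have hcl : l.count '\n' = 0 := by
            rw [List.count_eq_zero]; exact hl
          simp [hcl]
          rw [← hq]

-- the marker, as chars
def pvM : List Char := "Traceback (most recent call last)".toList

-- A's collect-until-terminator behaviour, extracted (proof helper only)
def pvCollect : List String → List String
  | [] => []
  | l :: rest => if pvTerm l then [l] else l :: pvCollect rest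

-- once the flag is set, A's loop collects until the terminator
theorem pvLoopA_true (xs : List String) : ∀ acc, pvLoopA xs acc true = acc ++ pvCollect xs := by
  induction xs with
  | nil => intro acc; simp [pvLoopA, pvCollect]
  | cons l rest ih =>
    intro acc
    by_cases h : pvTerm l = true <;> simp [pvLoopA, pvCollect, h, ih]

-- with the flag clear, A's loop finds the first anchor line and then collects
theorem pvLoopA_false (xs : List String) : ∀ acc,
    pvLoopA xs acc false =
      match xs.findIdx? pvAnchorIn with
      | none => acc
      | some i => acc ++ pvCollect (xs.drop i) := by
  induction xs with
  | nil => intro acc; simp [pvLoopA]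
  | cons l rest ih =>
    intro acc
    by_cases ha : pvAnchorIn l = true
    · by_cases h : pvTerm l = true <;>
        simp [pvLoopA, List.findIdx?_cons, ha, h, pvLoopA_true, pvCollect]
    · simp only [pvLoopA, List.findIdx?_cons, ha, Bool.false_eq_true, ite_false, ih]
      cases rest.findIdx? pvAnchorIn <;> simp

-- pvCollect is a take up to (and including) the first terminator
theorem pvCollect_eq_take (t : List String) :
    pvCollect t = t.take (match t.findIdx? pvTerm with | some j => j + 1 | none => t.length) := by
  induction t with
  | nil => simp [pvCollect]
  | cons l rest ih =>
    by_cases h : pvTerm l = true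
    · simp [pvCollect, List.findIdx?_cons, h]
    · simp only [pvCollect, List.findIdx?_cons, h, Bool.false_eq_true, ite_false, ih]
      cases hf : rest.findIdx? pvTerm <;> simp

-- B's enumerate-find? computes the first terminator index, at any start offset
theorem enumFind_opt (t : List String) : ∀ s : Int,
    ((PySem.List.enumerate t s).find? (fun p => pvTerm p.2)).map (·.1) =
      (t.findIdx? pvTerm).map (fun j => s + (j : Int)) := by
  induction t with
  | nil => intro s; simp [PySem.List.enumerate_nil]
  | cons l rest ih =>
    intro s
    rw [PySem.List.enumerate_cons, List.findIdx?_cons]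
    by_cases h : pvTerm l = true
    · simp [h]
    · rw [List.find?_cons_of_neg (by simp [h])]
      simp only [h, Bool.false_eq_true, ite_false]
      rw [ih (s + 1)]
      cases hf : rest.findIdx? pvTerm with
      | some j => simp; ring
      | none => simp

-- the window equality: last-20 of the collected prefix = arithmetic slice from the terminator index
theorem window_eq (t : List String) (ht : t ≠ []) :
    PySem.List.slice (pvCollect t) (some (-20)) none =
      PySem.List.slice t
        (some (max 0 ((match (PySem.List.enumerate t 0).find? (fun p => pvTerm p.2) with
                        | some p => p.1
                        | none => (t.length : Int) - 1) - 19)))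
        (some ((match (PySem.List.enumerate t 0).find? (fun p => pvTerm p.2) with
                 | some p => p.1
                 | none => (t.length : Int) - 1) + 1)) := by
  set m : Nat := (match t.findIdx? pvTerm with | some j => j + 1 | none => t.length) with hm
  have hmle : m ≤ t.length := by
    rw [hm]
    cases hf : t.findIdx? pvTerm with
    | some j =>
      have := List.findIdx?_eq_some_iff_findIdx_eq.mp hf
      simp only []
      omega
    | none => simp
  have hm1 : 1 ≤ m := by
    rw [hm]
    cases hf : t.findIdx? pvTerm with
    | some j => simp only []; omega
    | none =>
      simp only []
      have := List.length_pos_iff.mpr ht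
      omega
  have hopt := enumFind_opt t 0
  have he : (match (PySem.List.enumerate t 0).find? (fun p => pvTerm p.2) with
             | some p => p.1 | none => (t.length : Int) - 1) = (m : Int) - 1 := by
    cases hfind : (PySem.List.enumerate t 0).find? (fun p => pvTerm p.2) with
    | some p =>
      rw [hfind] at hopt
      show p.1 = (m : Int) - 1
      cases hf : t.findIdx? pvTerm with
      | some j =>
        rw [hf] at hopt
        simp at hopt
        rw [hm]
        simp only [hf]
        omega
      | none =>
        rw [hf] at hopt
        simp at hopt
    | none =>
      rw [hfind] at hopt
      show (t.length : Int) - 1 = (m : Int) - 1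
      cases hf : t.findIdx? pvTerm with
      | some j =>
        rw [hf] at hopt
        simp at hopt
      | none =>
        rw [hm]
        simp only [hf]
  rw [he, pvCollect_eq_take t, ← hm]
  rw [PySem.List.slice_from_neg_ofNat _ 20 (by norm_num)]
  rw [List.length_take, min_eq_left hmle]
  have ha : (0 : Int) ≤ max 0 ((m : Int) - 1 - 19) := le_max_left _ _
  have hb : (0 : Int) ≤ (m : Int) - 1 + 1 := by omega
  rw [PySem.List.slice_toNat t ha hb]
  have hae : (max 0 ((m : Int) - 1 - 19)).toNat = m - 20 := by omega
  have hbe : ((m : Int) - 1 + 1).toNat = m := by omega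
  rw [hae, hbe, List.drop_take]

-- the bridge, instantiated at the traceback marker
theorem pvBridge (cs : List Char) :
    (PySem.Chars.splitOn cs ['\n']).findIdx? (fun ln => PySem.Chars.isIn pvM ln) =
      (if PySem.Chars.find cs pvM = -1 then none
       else some ((cs.take (PySem.Chars.find cs pvM).toNat).count '\n')) :=
  pvBridge_gen pvM (by decide) (by decide) cs.length cs le_rfl

-- single-character count: PySem.Chars.count with a one-char needle is List.count
theorem count_go_eq (l : List Char) : ∀ (fuel acc : Nat), l.length ≤ fuel →
    PySem.Chars.count.go ['\n'] fuel l acc = acc + l.count '\n' := by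
  induction l with
  | nil => intro fuel acc _; rw [PySem.Chars.count.go.eq_def]; cases fuel <;> simp
  | cons c rest ih =>
    intro fuel acc hf
    cases fuel with
    | zero => simp at hf
    | succ f =>
      rw [PySem.Chars.count.go.eq_def]
      simp only [List.length_cons, Nat.succ_le_succ_iff] at hf
      by_cases hc : c = '\n'
      · subst hc
        simp [List.isPrefixOf, ih f (acc + 1) hf]
        omega
      · have hp : List.isPrefixOf ['\n'] (c :: rest) = false := by
          simp [List.isPrefixOf]; intro h; exact absurd h.symm hc
        simp [hp, ih f acc hf, hc]

theorem count_newline (cs : List Char) : PySem.Chars.count cs ['\n'] = cs.count '\n' := by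
  unfold PySem.Chars.count
  simp [count_go_eq cs cs.length 0 le_rfl]

-- splitting on "\n" at the String level
theorem lines_eq (s : String) :
    (PySem.Str.split? s "\n").getD [] = (PySem.Chars.splitOn s.toList ['\n']).map String.ofList := by
  simp [PySem.Str.split?, PySem.Chars.split?, show ("\n" : String).toList = ['\n'] from rfl]

-- ===== VERDICT (by name: the statement is the Claim_ definition above) =====
theorem extract_traceback_py_spec : Claim_equal_extract_traceback_py := by
  intro stderr _
  unfold Spec_extract_traceback_py extract_traceback_py extract_traceback_py_alt
  simp only [lines_eq]
  have hfind : PySem.Str.find stderr "Traceback (most recent call last)" =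
      PySem.Chars.find stderr.toList pvM := by
    simp [PySem.Str.find_eq, pvM]
  have hidx : (List.map String.ofList (PySem.Chars.splitOn stderr.toList ['\n'])).findIdx? pvAnchorIn =
      (PySem.Chars.splitOn stderr.toList ['\n']).findIdx? (fun ln => PySem.Chars.isIn pvM ln) := by
    rw [List.findIdx?_map]
    congr 1
    funext ln
    simp [pvAnchorIn, PySem.Str.isIn_eq, pvM, Function.comp]
  by_cases hpos : PySem.Chars.find stderr.toList pvM = -1
  · -- no marker anywhere: both return ""
    rw [hfind, if_pos hpos]
    by_cases hs : stderr = ""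
    · rw [if_pos hs]
    · rw [if_neg hs, pvLoopA_false, hidx, pvBridge, if_pos hpos]
      simp
  · -- marker found
    have h0 : 0 ≤ PySem.Chars.find stderr.toList pvM := by
      have := PySem.Chars.neg_one_le_find stderr.toList pvM; omega
    have hs : stderr ≠ "" := by
      intro hs
      obtain ⟨hpre, -⟩ := PySem.Chars.find_spec h0
      rw [hs] at hpre
      simp at hpre
      exact (by decide : pvM ≠ []) hpre
    rw [hfind, if_neg hpos, if_neg hs, pvLoopA_false, hidx, pvBridge, if_neg hpos]
    have hcnt : PySem.Str.count (PySem.Str.slice stderr none (some (PySem.Chars.find stderr.toList pvM))) "\n" =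
        ((stderr.toList.take (PySem.Chars.find stderr.toList pvM).toNat).count '\n') := by
      rw [PySem.Str.count_eq]
      simp only [PySem.Str.toList_slice, PySem.Chars.slice_eq_listSlice]
      rw [PySem.List.slice_to _ h0]
      rw [show ("\n" : String).toList = ['\n'] from rfl]
      exact count_newline _
    rw [hcnt]
    set i := (stderr.toList.take (PySem.Chars.find stderr.toList pvM).toNat).count '\n' with hi
    simp only [List.nil_append]
    have hilt : i < (PySem.Chars.splitOn stderr.toList ['\n']).length := by
      have := (List.findIdx?_eq_some_iff_findIdx_eq.mp
        (by rw [pvBridge, if_neg hpos, ← hi] :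
          (PySem.Chars.splitOn stderr.toList ['\n']).findIdx? (fun ln => PySem.Chars.isIn pvM ln) = some i)).1
      exact this
    have hne : (List.map String.ofList (PySem.Chars.splitOn stderr.toList ['\n'])).drop i ≠ [] := by
      intro h
      rw [List.drop_eq_nil_iff] at h
      simp at h
      omega
    obtain ⟨l, rest, hlr⟩ := List.exists_cons_of_ne_nil hne
    rw [hlr]
    have : pvCollect (l :: rest) ≠ [] := by
      by_cases h : pvTerm l = true <;> simp [pvCollect, h]
    rw [if_pos (by simpa using this)]
    rw [← hlr]
    exact congrArg _ (window_eq _ hne)
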